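-- pv_equiv track=rewrite | github.com/RyanMMU/ebee-conquest | engine/core.py | groupsubdivisionsbystate
-- ===== SOURCE A (Python) =====
-- def getparentstateidfromprovinceid(provinceid):
--     if "_" not in provinceid:
--         return provinceid
--     parentname = provinceid.rsplit("_", 1)[0]
--     namemismatchlookup = {"Trung_Bo": "Trong_Bo"}
--     return namemismatchlookup.get(parentname, parentname)
--
-- def groupsubdivisionsbystate(provincelist, statelist):
--     stateidset = {state["id"] for state in statelist}
--     groupedlookup = {stateid: [] for stateid in stateidset}
--
--     for province in provincelist:
--         parentstateid = getparentstateidfromprovinceid(province["id"])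
--         if parentstateid not in stateidset:
--             continue
--         province["parentid"] = parentstateid
--         groupedlookup[parentstateid].append(province)
--
--     return groupedlookup
-- ===== SOURCE B (Python) =====
-- def getparentstateidfromprovinceid(provinceid):
--     if "_" not in provinceid:
--         return provinceid
--     parentname = provinceid.rsplit("_", 1)[0]
--     namemismatchlookup = {"Trung_Bo": "Trong_Bo"}
--     return namemismatchlookup.get(parentname, parentname)
--
-- def groupsubdivisionsbystate(provincelist, statelist):
--     stateids = {state["id"] for state in statelist}
--     tagged = [dict(province, parentid=getparentstateidfromprovinceid(province["id"]))
--               for province in provincelist]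
--     return {sid: [p for p in tagged if p["parentid"] == sid] for sid in stateids}
-- ===== Notes on version B (the rewrite author's own statement) =====
-- stated objective: alternative
-- what changed: A groups in one pass by mutating each kept province and appending it into a dict of lists; B instead tags every province with its parent id once and builds each state's group by an independent per-state filter over the tagged list.
import Mathlib
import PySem

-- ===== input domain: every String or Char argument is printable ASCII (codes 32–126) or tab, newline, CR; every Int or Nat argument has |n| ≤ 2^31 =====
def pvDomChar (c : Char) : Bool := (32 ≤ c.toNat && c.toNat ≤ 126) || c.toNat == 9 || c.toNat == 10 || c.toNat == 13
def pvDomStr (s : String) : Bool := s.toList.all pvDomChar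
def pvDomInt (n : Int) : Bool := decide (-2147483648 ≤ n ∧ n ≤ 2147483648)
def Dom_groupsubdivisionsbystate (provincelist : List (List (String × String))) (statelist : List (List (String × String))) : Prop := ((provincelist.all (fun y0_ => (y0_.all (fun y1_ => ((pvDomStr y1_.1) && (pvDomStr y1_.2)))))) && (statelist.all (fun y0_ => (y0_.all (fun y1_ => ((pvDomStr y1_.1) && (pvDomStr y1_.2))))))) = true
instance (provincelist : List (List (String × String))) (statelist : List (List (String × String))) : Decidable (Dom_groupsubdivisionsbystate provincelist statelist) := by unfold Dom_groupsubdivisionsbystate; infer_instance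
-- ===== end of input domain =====

-- B replaces A's single-pass mutate-and-append grouping loop by tagging every province once and
-- building each state's group with an independent per-key filter (objective: alternative decomposition).
-- NOTE on side effects: Python A mutates the kept province dicts in place (sets province["parentid"]);
-- B does not mutate its arguments — the equivalence proved here is about the RETURN value only.

-- ===== PORT A =====
-- shared same-module helper of both Pythons
def getparentstateidfromprovinceid (provinceid : String) : String :=
  if PySem.Str.isIn "_" provinceid = false then provinceid
  else
    -- provinceid.rsplit("_", 1)[0] = the prefix before the LAST "_"; exact here since "_" occurs in provinceid
    let parentname := PySem.Str.slice provinceid none (some (PySem.Str.rfind provinceid "_"))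
    (PySem.Dict.mk [("Trung_Bo", "Trong_Bo")]).getD parentname parentname

def groupsubdivisionsbystate (provincelist : List (List (String × String))) (statelist : List (List (String × String))) : List (String × List (List (String × String))) :=
  -- state["id"] / province["id"]: KeyError when "id" is absent — excluded by Pre_; getD "" totalises
  let stateidset : PySem.Set String :=
    PySem.Set.ofList (statelist.map (fun state => (PySem.Dict.mk state).getD "id" ""))
  let groupedlookup : PySem.Dict String (List (List (String × String))) :=
    stateidset.foldl (fun d stateid => d.insert stateid []) (PySem.Dict.mk [])
  let final := provincelist.foldl (fun d province =>
      let parentstateid := getparentstateidfromprovinceid ((PySem.Dict.mk province).getD "id" "")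
      if stateidset.contains parentstateid = false then d   -- continue
      else
        let province' := ((PySem.Dict.mk province).insert "parentid" parentstateid).items
        d.modify parentstateid [] (fun l => l ++ [province'])) groupedlookup
  final.items

-- ===== PORT B =====
def groupsubdivisionsbystate_alt (provincelist : List (List (String × String))) (statelist : List (List (String × String))) : List (String × List (List (String × String))) :=
  let stateids : PySem.Set String :=
    PySem.Set.ofList (statelist.map (fun state => (PySem.Dict.mk state).getD "id" ""))
  let tagged := provincelist.map (fun province =>
      ((PySem.Dict.mk province).insert "parentid"
        (getparentstateidfromprovinceid ((PySem.Dict.mk province).getD "id" ""))).items)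
  stateids.map (fun sid => (sid, tagged.filter (fun p => (PySem.Dict.mk p).getD "parentid" "" == sid)))

-- ===== PRECONDITION & SPEC =====
-- Pre_ excludes exactly the inputs where Python raises KeyError: a state or province dict without an "id" key.
def Pre_groupsubdivisionsbystate (provincelist : List (List (String × String))) (statelist : List (List (String × String))) : Prop :=
  (∀ p ∈ provincelist, (PySem.Dict.mk p).contains "id" = true) ∧
  (∀ s ∈ statelist, (PySem.Dict.mk s).contains "id" = true)
instance (provincelist : List (List (String × String))) (statelist : List (List (String × String))) : Decidable (Pre_groupsubdivisionsbystate provincelist statelist) := by unfold Pre_groupsubdivisionsbystate; infer_instance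
def pvWitness_groupsubdivisionsbystate : (List (List (String × String))) × (List (List (String × String))) :=
  ([[("id", "Trung_Bo_1")], [("id", "Aceh_2")]], [[("id", "Trong_Bo")], [("id", "Aceh")]])
def Spec_groupsubdivisionsbystate (provincelist : List (List (String × String))) (statelist : List (List (String × String))) (out : List (String × List (List (String × String)))) : Prop := out = groupsubdivisionsbystate_alt provincelist statelist
instance (provincelist : List (List (String × String))) (statelist : List (List (String × String))) (out : List (String × List (List (String × String)))) : Decidable (Spec_groupsubdivisionsbystate provincelist statelist out) := by unfold Spec_groupsubdivisionsbystate; infer_instance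

-- ===== CLAIM (what is proved, stated in full; the proofs are below) =====
def Claim_equal_groupsubdivisionsbystate : Prop := ∀ (provincelist : List (List (String × String))) (statelist : List (List (String × String))), Dom_groupsubdivisionsbystate provincelist statelist → Pre_groupsubdivisionsbystate provincelist statelist → Spec_groupsubdivisionsbystate provincelist statelist (groupsubdivisionsbystate provincelist statelist)

-- ===== LEMMAS AND PROOFS =====

-- the parent-state key of a province (used only in the proofs)
def pvKey (province : List (String × String)) : String :=
  getparentstateidfromprovinceid ((PySem.Dict.mk province).getD "id" "")

-- the tagged province (used only in the proofs)
def pvVal (province : List (String × String)) : List (String × String) :=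
  ((PySem.Dict.mk province).insert "parentid" (pvKey province)).items

theorem pvVal_parentid (province : List (String × String)) :
    (PySem.Dict.mk (pvVal province)).getD "parentid" "" = pvKey province := by
  show ((PySem.Dict.mk province).insert "parentid" (pvKey province)).getD "parentid" "" = pvKey province
  simp [PySem.Dict.getD_insert_self]

theorem pv_loop_items (S : PySem.Set String) (ps : List (List (String × String)))
    (d : PySem.Dict String (List (List (String × String))))
    (hnd : d.keys.Nodup) (hc : ∀ x, PySem.Set.contains S x = d.contains x) :
    (ps.foldl (fun d province =>
      if PySem.Set.contains S (pvKey province) = false then d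
      else d.modify (pvKey province) [] (fun l => l ++ [pvVal province])) d).items
    = d.items.map (fun kv => (kv.1, kv.2 ++ (ps.filter (fun p => pvKey p == kv.1)).map pvVal)) := by
  induction ps generalizing d with
  | nil => simp
  | cons p ps ih =>
    simp only [List.foldl_cons, List.filter_cons]
    by_cases h : PySem.Set.contains S (pvKey p) = true
    · -- kept province: the dict is updated at key (pvKey p)
      have hcd : d.contains (pvKey p) = true := by rw [← hc]; exact h
      rw [if_neg (by rw [h]; simp)]
      have hmod : d.modify (pvKey p) [] (fun l => l ++ [pvVal p])
          = d.insert (pvKey p) (d.getD (pvKey p) [] ++ [pvVal p]) := by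
        simp [PySem.Dict.modify]
      rw [hmod, ih]
      · rw [PySem.Dict.items_insert_of_contains _ _ hcd]
        rw [List.map_map]
        apply List.map_congr_left
        intro kv hkv
        by_cases hk : kv.1 = pvKey p
        · have hget : d.get? kv.1 = some kv.2 := PySem.Dict.get?_of_mem_items d hkv hnd
          have hgd : d.getD (pvKey p) [] = kv.2 := by
            rw [← hk]; simp [PySem.Dict.getD, hget]
          have hbeq : (kv.1 == pvKey p) = true := by simp [hk]
          have hbeq' : (pvKey p == kv.1) = true := by simp [hk]
          simp only [Function.comp, hbeq, if_pos, hgd, hbeq', List.map_cons]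
          simp [hk, List.append_assoc]
        · have hb1 : (kv.1 == pvKey p) = false := by simp [hk]
          have hb2 : (pvKey p == kv.1) = false := by simp [Ne.symm hk]
          simp only [Function.comp, hb1, hb2]
          simp
      · rw [PySem.Dict.keys_insert_of_contains _ _ hcd]; exact hnd
      · intro x
        rw [hc x, PySem.Dict.contains_insert]
        by_cases hx : x = pvKey p <;> simp [hx, hcd]
    · -- skipped province
      have h' : PySem.Set.contains S (pvKey p) = false := by
        cases hb : PySem.Set.contains S (pvKey p)
        · rfl
        · exact absurd hb h
      rw [if_pos h']
      rw [ih d hnd hc]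
      apply List.map_congr_left
      intro kv hkv
      have hmem : kv.1 ∈ d.keys := by
        simp only [PySem.Dict.keys]; exact List.mem_map_of_mem hkv
      have hck : d.contains kv.1 = true := by
        rw [PySem.Dict.contains_iff_mem_keys]; exact hmem
      have hne : (pvKey p == kv.1) = false := by
        by_contra hb
        have heq : pvKey p = kv.1 := by
          cases hbe : (pvKey p == kv.1)
          · exact absurd hbe hb
          · exact eq_of_beq hbe
        rw [← hc] at hck
        rw [heq] at h'
        rw [h'] at hck
        exact Bool.false_ne_true hck
      simp [hne]

theorem pv_seed_items (S : PySem.Set String) (hnd : S.Nodup) :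
    (S.foldl (fun d stateid => d.insert stateid ([] : List (List (String × String)))) (PySem.Dict.mk [])).items
    = S.map (fun sid => (sid, [])) := by
  have := PySem.Dict.items_foldl_insert_fresh (l := S) (k := fun x => x)
    (v := fun _ => ([] : List (List (String × String)))) (d := PySem.Dict.mk [])
    (by intro a _; simp [PySem.Dict.contains]) (by simpa using hnd)
  simpa using this

-- ===== VERDICT (by name: the statement is the Claim_ definition above) =====
theorem groupsubdivisionsbystate_spec : Claim_equal_groupsubdivisionsbystate := by
  intro provincelist statelist _ _
  show groupsubdivisionsbystate provincelist statelist = groupsubdivisionsbystate_alt provincelist statelist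
  unfold groupsubdivisionsbystate groupsubdivisionsbystate_alt
  set S : PySem.Set String :=
    PySem.Set.ofList (statelist.map (fun state => (PySem.Dict.mk state).getD "id" "")) with hS
  have hndS : S.Nodup := PySem.Set.nodup_ofList _
  set d0 := S.foldl (fun d stateid => d.insert stateid ([] : List (List (String × String)))) (PySem.Dict.mk []) with hd0
  have hitems : d0.items = S.map (fun sid => (sid, [])) := pv_seed_items S hndS
  have hkeys : d0.keys = S := by
    show d0.items.map Prod.fst = S
    rw [hitems, List.map_map]
    rw [show (Prod.fst ∘ fun sid : String => (sid, ([] : List (List (String × String))))) = id from rfl]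
    exact List.map_id S
  have hnd : d0.keys.Nodup := by rw [hkeys]; exact hndS
  have hc : ∀ x, PySem.Set.contains S x = d0.contains x := by
    intro x
    rw [PySem.Dict.contains_eq_decide_mem_keys, hkeys]
    cases hb : PySem.Set.contains S x
    · have hx : x ∉ S := fun hm => by
        rw [(PySem.Set.contains_iff S x).mpr hm] at hb; cases hb
      simp [hx]
    · have hx : x ∈ S := (PySem.Set.contains_iff S x).mp hb
      simp [hx]
  refine (pv_loop_items S provincelist d0 hnd hc).trans ?_
  rw [hitems, List.map_map]
  apply List.map_congr_left
  intro sid _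
  simp only [Function.comp]
  rw [List.filter_map]
  simp only [List.nil_append]
  have hfix : List.filter ((fun p => (PySem.Dict.mk p).getD "parentid" "" == sid) ∘ pvVal) provincelist
      = List.filter (fun p => pvKey p == sid) provincelist := by
    apply List.filter_congr
    intro p _
    show ((PySem.Dict.mk (pvVal p)).getD "parentid" "" == sid) = (pvKey p == sid)
    rw [pvVal_parentid]
  exact congrArg (fun l => (sid, List.map pvVal l)) hfix.symm
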